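-- pv_equiv track=rewrite | github.com/arnaudDup/OT1-INSA | src/encoded_posting.py | decode7bit_one_oct
-- ===== SOURCE A (Python) =====
-- def decode7bit_one_oct(my_str):
--     """
--     decode one array of 7 bit
--     :param my_str: the 7 bits represented in a string
--     :return: the intger represented by the string
--     """
--     temp = my_str
--     order = 1
--     res = 0
--     while temp != []:
--         bit = temp.pop(len(temp)-1)
--         if bit == '1' :
--             res += order
--         order *= 2
--     return res
-- ===== SOURCE B (Python) =====
-- def decode7bit_one_oct(my_str):
--     """
--     decode one array of 7 bit
--     :param my_str: the 7 bits represented in a string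
--     :return: the intger represented by the string
--     """
--     res = 0
--     for bit in my_str:
--         res = res * 2 + (1 if bit == '1' else 0)
--     my_str.clear()  # A empties its argument by popping; keep the same side effect
--     return res
-- ===== Notes on version B (the rewrite author's own statement) =====
-- stated objective: faster
-- what changed: Replaces the back-to-front pop loop that maintains a doubling place value 'order' with a single forward Horner pass (res = res*2 + bit) followed by one clear(), keeping the list-emptying side effect.
import Mathlib
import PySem

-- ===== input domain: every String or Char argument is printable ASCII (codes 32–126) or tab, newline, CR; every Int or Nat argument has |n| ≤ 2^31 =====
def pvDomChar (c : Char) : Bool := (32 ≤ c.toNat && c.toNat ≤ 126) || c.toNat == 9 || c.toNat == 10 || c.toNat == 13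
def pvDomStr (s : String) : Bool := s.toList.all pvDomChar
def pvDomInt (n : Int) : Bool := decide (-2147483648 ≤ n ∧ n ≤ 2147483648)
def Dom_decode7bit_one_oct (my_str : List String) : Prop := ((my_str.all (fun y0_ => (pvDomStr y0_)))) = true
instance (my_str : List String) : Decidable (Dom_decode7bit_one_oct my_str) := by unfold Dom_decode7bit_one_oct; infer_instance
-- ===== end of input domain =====

-- B replaces A's back-to-front pop loop (growing place value `order`) by a forward Horner pass.
-- Both Pythons empty the argument list in place; the equivalence proved here is about the RETURN value.

-- ===== PORT A =====
-- A's while loop: while temp != []: bit = temp.pop(len(temp)-1); if bit == '1': res += order; order *= 2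
def decode7bitLoopA (temp : List String) (order res : Int) : Int :=
  match h : temp.getLast? with   -- temp != [] test together with temp.pop(len(temp)-1)
  | none => res
  | some bit =>
      decode7bitLoopA temp.dropLast (order * 2) (if bit = "1" then res + order else res)
termination_by temp.length
decreasing_by
  have : temp ≠ [] := by intro hn; simp [hn] at h
  cases temp with
  | nil => exact absurd rfl this
  | cons x xs => simp

def decode7bit_one_oct (my_str : List String) : Int :=
  decode7bitLoopA my_str 1 0

-- ===== PORT B =====
-- for bit in my_str: res = res*2 + (1 if bit == '1' else 0)  (the final my_str.clear() is a mutation, not part of the value)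
def decode7bit_one_oct_alt (my_str : List String) : Int :=
  my_str.foldl (fun res bit => res * 2 + (if bit = "1" then 1 else 0)) 0

-- ===== PRECONDITION & SPEC =====
def Spec_decode7bit_one_oct (my_str : List String) (out : Int) : Prop := out = decode7bit_one_oct_alt my_str
instance (my_str : List String) (out : Int) : Decidable (Spec_decode7bit_one_oct my_str out) := by unfold Spec_decode7bit_one_oct; infer_instance

-- ===== CLAIM (what is proved, stated in full; the proofs are below) =====
def Claim_equal_decode7bit_one_oct : Prop := ∀ (my_str : List String), Dom_decode7bit_one_oct my_str → Spec_decode7bit_one_oct my_str (decode7bit_one_oct my_str)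

-- ===== LEMMAS AND PROOFS =====

-- Horner value of the list, read front to back (B's fold from an arbitrary start is not needed; 0 suffices).
theorem foldl_horner_append (xs : List String) (b : String) (a : Int) :
    (xs ++ [b]).foldl (fun res bit => res * 2 + (if bit = "1" then 1 else 0)) a
      = (xs.foldl (fun res bit => res * 2 + (if bit = "1" then 1 else 0)) a) * 2
        + (if b = "1" then 1 else 0) := by
  simp [List.foldl_append]

theorem decode7bitLoopA_eq (temp : List String) :
    ∀ (order res : Int),
      decode7bitLoopA temp order res
        = res + order * temp.foldl (fun res bit => res * 2 + (if bit = "1" then 1 else 0)) 0 := by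
  induction temp using List.reverseRecOn with
  | nil => intro order res; unfold decode7bitLoopA; simp
  | append_singleton xs b ih =>
      intro order res
      unfold decode7bitLoopA
      rw [show (xs ++ [b]).getLast? = some b from by simp]
      simp only [List.dropLast_concat]
      rw [ih, foldl_horner_append]
      split_ifs <;> ring

-- ===== VERDICT (by name: the statement is the Claim_ definition above) =====
theorem decode7bit_one_oct_spec : Claim_equal_decode7bit_one_oct := by
  intro my_str _
  unfold Spec_decode7bit_one_oct decode7bit_one_oct decode7bit_one_oct_alt
  rw [decode7bitLoopA_eq]
  ring
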